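-- pv_equiv track=rewrite | github.com/ashvardanian/minSH | minsh/rolling_hashes.py | rolling_hash_string_pair_intersection
-- ===== SOURCE A (Python) =====
-- def __rolling_hash_dumb(string: str, substring_size: str, base: int = 256, mod: int = 2**61 - 1) -> list[int]:
--     """Helper for below. Return none where it should have Nones.
--
--     I'm pretty sure this works because of modulus being "independent".
--     """
--     assert 0 <= substring_size and substring_size <= len(string)
--     assert base <= mod
--     assert base * base <= mod
--     assert len(set(string)) <= base
--     base = len(set(string))
--
--     # Pre-calculate powers of the base so that we can do the rolling hash in O(1) per roll => O(n) for this function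
--     max_power = 1
--     for i in range(1, substring_size):
--         max_power = max_power * base
--         max_power = max_power % mod
--
--     rolling_values = [None] * (len(string))
--     if substring_size == 0:
--         return rolling_values
--
--     rhsh = 0
--     for i in range(substring_size):
--         rhsh *= base
--         rhsh = rhsh % mod
--         rhsh += ord(string[i])
--         rhsh = rhsh % mod
--     rolling_values[substring_size - 1] = rhsh
--
--     for i in range(substring_size, len(string), 1):
--         # 1. Take away the leftmost character portion
--         # Do this here in a loop because it might be too big for modulus
--         subber = ord(string[i - substring_size])
--         subber *= max_power
--         subber = subber % mod
--         # ...
--         rhsh -= subber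
--         # Incase we under-flow
--         rhsh = rhsh % mod
--
--         # 2. Shift and add new character in
--         rhsh *= base
--         rhsh = rhsh % mod
--         rhsh += ord(string[i])
--         rhsh = rhsh % mod
--
--         # 3. Update
--         rolling_values[i] = rhsh
--
--     assert rolling_values[-1] is not None
--     assert len(rolling_values) == len(string)
--     assert rolling_values.count(None) == substring_size - 1
--     return rolling_values
--
-- def rolling_hash_string_pair_intersection(string1: str, string2: str, substring_size: str, base: int = 256, mod: int = 2**61 - 1) -> bool:
--     """
--     Check if two strings contain the same substring.
--
--     It uses a dumb (fast enough) implementation of a rolling hash function because WTF python doesn't have one? In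
--     the future we need to replace this with an actually efficient version. It is possible that the mod is bad.
--
--     Our default value of the mod is 2^61 - 1 is prime: https://bigprimes.org/primality-test (not on
--     https://en.wikipedia.org/wiki/Mersenne_prime either).
--     """
--
--     assert len(set(string1)) <= base
--     assert len(set(string2)) <= base
--
--
--     rolling_hashes_string1 = __rolling_hash_dumb(string=string1, substring_size=substring_size, base=base, mod=mod)
--     rolling_hashes_string1 = set(rolling_hashes_string1)
--     if None in rolling_hashes_string1:
--         rolling_hashes_string1.remove(None)
--     rolling_hashes_string2 = __rolling_hash_dumb(string=string2, substring_size=substring_size, base=base, mod=mod)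
--     for z in rolling_hashes_string2:
--         if z is not None and z in rolling_hashes_string1:
--             return True
--     return False
-- ===== SOURCE B (Python) =====
-- def rolling_hash_string_pair_intersection(string1: str, string2: str, substring_size: str, base: int = 256, mod: int = 2**61 - 1) -> bool:
--     """Same check, but each window hash is recomputed directly as a left-to-right
--     polynomial fold over the window, instead of maintaining a rolling hash."""
--     assert len(set(string1)) <= base
--     assert len(set(string2)) <= base
--
--     def window_hashes(s):
--         assert 0 <= substring_size <= len(s)
--         assert base <= mod
--         assert base * base <= mod
--         b = len(set(s))
--         hashes = set()
--         for i in range(substring_size, len(s) + 1):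
--             h = 0
--             for c in s[i - substring_size:i]:
--                 h = (h * b + ord(c)) % mod
--             hashes.add(h)
--         return hashes
--
--     hashes1 = window_hashes(string1)
--     hashes2 = window_hashes(string2)
--     if substring_size == 0:
--         return False
--     return not hashes1.isdisjoint(hashes2)
-- ===== Notes on version B (the rewrite author's own statement) =====
-- stated objective: simpler
-- what changed: Replaced the rolling-hash recurrence (precomputed max_power, subtract-leading-char, shift, add) and the None-padded rolling_values list by a direct per-window polynomial fold: each window hash is recomputed from scratch as (h*b + ord(c)) % mod over the window slice, collected straight into a set, and the two sets are intersected with isdisjoint.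
import Mathlib
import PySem

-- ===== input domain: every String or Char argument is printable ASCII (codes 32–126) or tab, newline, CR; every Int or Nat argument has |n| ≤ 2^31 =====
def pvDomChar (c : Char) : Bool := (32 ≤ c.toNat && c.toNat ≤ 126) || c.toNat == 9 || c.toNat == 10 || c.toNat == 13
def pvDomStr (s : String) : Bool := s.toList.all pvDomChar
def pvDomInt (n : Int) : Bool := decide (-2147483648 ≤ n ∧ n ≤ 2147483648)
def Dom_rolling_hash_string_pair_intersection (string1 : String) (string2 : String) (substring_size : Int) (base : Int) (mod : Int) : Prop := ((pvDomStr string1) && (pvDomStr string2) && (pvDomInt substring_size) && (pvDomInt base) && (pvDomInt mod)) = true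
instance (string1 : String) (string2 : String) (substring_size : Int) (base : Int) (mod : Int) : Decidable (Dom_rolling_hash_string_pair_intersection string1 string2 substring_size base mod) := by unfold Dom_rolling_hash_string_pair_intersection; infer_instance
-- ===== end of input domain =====

-- B replaces A's rolling-hash recurrence by a direct per-window polynomial fold (simpler, no rolling state); return values agree on all inputs where A returns (Pre_ excludes exactly A's AssertionError inputs).

-- len(set(string)) — used by both sources
def pvNumDistinct (cs : List Char) : Int := ((PySem.Set.ofList cs).length : Int)

-- ===== PORT A =====
-- __rolling_hash_dumb; `none` where a Python assert fails (AssertionError)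
def pvRollDumb (s : List Char) (k base mod : Int) : Option (List (Option Int)) :=
  if ¬(0 ≤ k ∧ k ≤ (s.length : Int)) then none
  else if ¬(base ≤ mod) then none
  else if ¬(base * base ≤ mod) then none
  else if ¬(pvNumDistinct s ≤ base) then none
  else
    let b := pvNumDistinct s
    let maxPower := (PySem.List.pyRange 1 k).foldl (fun p _ => PySem.Int.mod (p * b) mod) 1
    let rv0 : List (Option Int) := List.replicate s.length none
    if k = 0 then some rv0
    else
      let rhsh := (PySem.List.pyRange 0 k).foldl
        (fun h i => PySem.Int.mod (PySem.Int.mod (h * b) mod + ((PySem.List.pyGetD s i ' ').toNat : Int)) mod) 0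
      let rv1 := PySem.List.pySetD rv0 (k - 1) (some rhsh)
      let st := (PySem.List.pyRange k (s.length : Int)).foldl
        (fun st i =>
          let subber := PySem.Int.mod (((PySem.List.pyGetD s (i - k) ' ').toNat : Int) * maxPower) mod
          let h1 := PySem.Int.mod (st.1 - subber) mod
          let h2 := PySem.Int.mod (PySem.Int.mod (h1 * b) mod + ((PySem.List.pyGetD s i ' ').toNat : Int)) mod
          (h2, PySem.List.pySetD st.2 i (some h2)))
        (rhsh, rv1)
      if PySem.List.pyGetD st.2 (-1) none = none then none
      else if ¬((st.2.length : Int) = (s.length : Int)) then none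
      else if ¬((st.2.count none : Int) = k - 1) then none
      else some st.2

def rolling_hash_string_pair_intersection (string1 : String) (string2 : String) (substring_size : Int) (base : Int) (mod : Int) : Bool :=
  if ¬(pvNumDistinct string1.toList ≤ base) then false
  else if ¬(pvNumDistinct string2.toList ≤ base) then false
  else match pvRollDumb string1.toList substring_size base mod with
    | none => false
    | some rv1 =>
      let set1 := PySem.Set.ofList rv1
      let set1 := if PySem.Set.contains set1 none then PySem.Set.discard set1 none else set1
      match pvRollDumb string2.toList substring_size base mod with
      | none => false
      | some rv2 => rv2.any (fun z => !(z == none) && PySem.Set.contains set1 z)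

-- ===== PORT B =====
-- window_hashes from Source B; `none` where an assert fails
def pvWindowHashes (s : List Char) (k base mod : Int) : Option (PySem.Set Int) :=
  if ¬(0 ≤ k ∧ k ≤ (s.length : Int)) then none
  else if ¬(base ≤ mod) then none
  else if ¬(base * base ≤ mod) then none
  else
    let b := pvNumDistinct s
    some ((PySem.List.pyRange k ((s.length : Int) + 1)).foldl
      (fun hs i =>
        let h := (PySem.List.slice s (some (i - k)) (some i)).foldl
          (fun h c => PySem.Int.mod (h * b + (c.toNat : Int)) mod) 0
        PySem.Set.add hs h)
      PySem.Set.empty)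

def rolling_hash_string_pair_intersection_alt (string1 : String) (string2 : String) (substring_size : Int) (base : Int) (mod : Int) : Bool :=
  if ¬(pvNumDistinct string1.toList ≤ base) then false
  else if ¬(pvNumDistinct string2.toList ≤ base) then false
  else match pvWindowHashes string1.toList substring_size base mod,
             pvWindowHashes string2.toList substring_size base mod with
    | some h1, some h2 => if substring_size = 0 then false else !(PySem.Set.isdisjoint h1 h2)
    | _, _ => false

-- ===== PRECONDITION & SPEC =====
-- Pre_ excludes exactly the inputs on which A raises AssertionError (its four asserts per string plus the two outer asserts); A returns on everything else.
def Pre_rolling_hash_string_pair_intersection (string1 : String) (string2 : String) (substring_size : Int) (base : Int) (mod : Int) : Prop :=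
  0 ≤ substring_size ∧ substring_size ≤ (string1.toList.length : Int) ∧ substring_size ≤ (string2.toList.length : Int) ∧
  base ≤ mod ∧ base * base ≤ mod ∧
  pvNumDistinct string1.toList ≤ base ∧ pvNumDistinct string2.toList ≤ base
instance (string1 : String) (string2 : String) (substring_size : Int) (base : Int) (mod : Int) : Decidable (Pre_rolling_hash_string_pair_intersection string1 string2 substring_size base mod) := by unfold Pre_rolling_hash_string_pair_intersection; infer_instance
def pvWitness_rolling_hash_string_pair_intersection : String × String × Int × Int × Int := ("ab", "ba", 1, 256, 65536)

def Spec_rolling_hash_string_pair_intersection (string1 : String) (string2 : String) (substring_size : Int) (base : Int) (mod : Int) (out : Bool) : Prop := out = rolling_hash_string_pair_intersection_alt string1 string2 substring_size base mod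
instance (string1 : String) (string2 : String) (substring_size : Int) (base : Int) (mod : Int) (out : Bool) : Decidable (Spec_rolling_hash_string_pair_intersection string1 string2 substring_size base mod out) := by unfold Spec_rolling_hash_string_pair_intersection; infer_instance

-- ===== CLAIM (what is proved, stated in full; the proofs are below) =====
def Claim_equal_rolling_hash_string_pair_intersection : Prop := ∀ (string1 : String) (string2 : String) (substring_size : Int) (base : Int) (mod : Int), Dom_rolling_hash_string_pair_intersection string1 string2 substring_size base mod → Pre_rolling_hash_string_pair_intersection string1 string2 substring_size base mod → Spec_rolling_hash_string_pair_intersection string1 string2 substring_size base mod (rolling_hash_string_pair_intersection string1 string2 substring_size base mod)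

-- ===== LEMMAS AND PROOFS =====

-- pure polynomial value of a window, its value mod m, and the window ending just before index j
def pvP (b : Int) (w : List Char) : Int := w.foldl (fun h c => h * b + (c.toNat : Int)) 0
def pvH (b m : Int) (w : List Char) : Int := pvP b w % m
def pvWin (cs : List Char) (K j : Nat) : List Char := (cs.drop (j - K)).take K
-- the hashes of all windows of length K, in order
def pvHashes (cs : List Char) (K : Nat) (m : Int) : List Int :=
  (List.range' K (cs.length - K + 1)).map (fun j => pvH (pvNumDistinct cs) m (pvWin cs K j))
-- A's rolling_values list after the windows ending before index ≤ j have been written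
def pvRvAt (cs : List Char) (K : Nat) (m : Int) (j : Nat) : List (Option Int) :=
  List.replicate (K - 1) none
    ++ ((List.range' K (j - K + 1)).map (fun i => (some (pvH (pvNumDistinct cs) m (pvWin cs K i)) : Option Int)))
    ++ List.replicate (cs.length - j) none

lemma pv_pyRange_natCast (a b : Nat) (h : a ≤ b) :
    PySem.List.pyRange (a : Int) (b : Int) = List.map (fun i : Nat => (i : Int)) (List.range' a (b - a)) := by
  obtain ⟨d, rfl⟩ := Nat.exists_eq_add_of_le h
  induction d with
  | zero => rw [show ((a+0:Nat):Int) = (a:Int) by push_cast; ring]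
            simp [PySem.List.pyRange]
  | succ d ih =>
      rw [show ((a+(d+1):Nat):Int) = ((a+d:Nat):Int) + 1 by push_cast; ring,
          PySem.List.pyRange_one_succ_right (by push_cast; omega)]
      rw [ih (by omega)]
      rw [show a + (d+1) - a = d + 1 by omega, List.range'_concat]
      simp

lemma pv_set_append {α : Type} (xs ys : List α) (v : α) :
    (xs ++ ys).set xs.length v = xs ++ ys.set 0 v := by
  induction xs with
  | nil => simp
  | cons x xs ih => simp [ih]

lemma pv_set_append' {α : Type} (xs ys : List α) (v : α) (n : Nat) (h : n = xs.length) :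
    (xs ++ ys).set n v = xs ++ ys.set 0 v := by
  subst h; exact pv_set_append xs ys v

lemma pv_foldl_range'_getElem {α : Type} (cs : List Char) (g : α → Char → α) (d : Char) :
    ∀ (len p : Nat), p + len ≤ cs.length → ∀ (init : α),
      (List.range' p len).foldl (fun acc i => g acc (cs.getD i d)) init
        = ((cs.drop p).take len).foldl g init := by
  intro len
  induction len with
  | zero => simp
  | succ len ih =>
      intro p hp init
      have htake : (cs.drop p).take (len+1) = cs[p]'(by omega) :: (cs.drop (p+1)).take len := by
        rw [List.drop_eq_getElem_cons (show p < cs.length by omega), List.take_succ_cons]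
      rw [List.range'_succ, htake]
      simp only [List.foldl_cons]
      rw [ih (p+1) (by omega)]
      congr 1
      simp [List.getD, List.getElem?_eq_getElem (by omega : p < cs.length)]

lemma pv_foldmod (b m : Int) : ∀ (w : List Char) (h : Int),
    w.foldl (fun h c => (h * b + (c.toNat : Int)) % m) (h % m)
      = (w.foldl (fun h c => h * b + (c.toNat : Int)) h) % m := by
  intro w
  induction w with
  | nil => intro h; rfl
  | cons c w ih =>
      intro h
      simp only [List.foldl_cons]
      have h1 : (h % m) ≡ h [ZMOD m] := Int.emod_emod_of_dvd h dvd_rfl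
      have h2 : (h % m * b + (c.toNat:Int)) % m = (h*b+(c.toNat:Int)) % m :=
        (h1.mul_right b).add_right _
      rw [h2]
      exact ih (h*b+(c.toNat:Int))

lemma pvP_append (b : Int) (u : List Char) (d : Char) :
    pvP b (u ++ [d]) = pvP b u * b + (d.toNat : Int) := by
  unfold pvP
  simp [List.foldl_append]

lemma pvP_shift (b : Int) : ∀ (u : List Char) (h : Int),
    u.foldl (fun h c => h * b + (c.toNat : Int)) h
      = h * b ^ u.length + u.foldl (fun h c => h * b + (c.toNat : Int)) 0 := by
  intro u
  induction u with
  | nil => simp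
  | cons c u ih =>
      intro h
      simp only [List.foldl_cons, List.length_cons]
      rw [ih (h * b + (c.toNat:Int)), ih ((0:Int) * b + (c.toNat:Int))]
      ring

lemma pv_twostep (b m : Int) (hm : 0 < m) :
    (fun (h : Int) (c : Char) => PySem.Int.mod (PySem.Int.mod (h * b) m + ((c.toNat : Int))) m)
      = fun h c => (h * b + (c.toNat : Int)) % m := by
  funext h c
  rw [PySem.Int.mod_eq_emod_of_pos hm, PySem.Int.mod_eq_emod_of_pos hm, Int.emod_add_emod]

lemma pv_maxPower (b m : Int) (hm : 0 < m) (K : Nat) (hK : 1 ≤ K) :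
    ((PySem.List.pyRange 1 (K : Int)).foldl (fun p _ => PySem.Int.mod (p * b) m) 1) % m
      = b ^ (K - 1) % m := by
  obtain ⟨d, rfl⟩ := Nat.exists_eq_add_of_le hK
  induction d with
  | zero => norm_num [show ((1+0:Nat):Int) = (1:Int) by norm_num, PySem.List.pyRange]
  | succ d ih =>
      rw [show ((1+(d+1):Nat):Int) = ((1+d:Nat):Int) + 1 by push_cast; ring,
          PySem.List.pyRange_one_succ_right (by push_cast; omega), List.foldl_append]
      simp only [List.foldl_cons, List.foldl_nil]
      rw [PySem.Int.mod_eq_emod_of_pos hm]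
      rw [Int.emod_emod_of_dvd _ dvd_rfl, Int.mul_emod, ih (by omega), ← Int.mul_emod]
      rw [show 1+(d+1)-1 = (1+d-1)+1 by omega, pow_succ]

lemma pv_step (b m : Int) (hm : 0 < m) (K' : Nat) (mp : Int)
    (hmp : mp % m = b ^ K' % m) (c d : Char) (u : List Char) (hu : u.length = K') :
    PySem.Int.mod (PySem.Int.mod (PySem.Int.mod (pvH b m (c :: u) - PySem.Int.mod ((c.toNat : Int) * mp) m) m * b) m + (d.toNat : Int)) m
      = pvH b m (u ++ [d]) := by
  simp only [PySem.Int.mod_eq_emod_of_pos hm]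
  have hmp' : mp ≡ b ^ K' [ZMOD m] := hmp
  have hrh : pvH b m (c :: u) ≡ pvP b (c :: u) [ZMOD m] := Int.emod_emod_of_dvd _ dvd_rfl
  have hsub : ((c.toNat:Int) * mp) % m ≡ (c.toNat:Int) * b ^ K' [ZMOD m] :=
    (Int.emod_emod_of_dvd _ dvd_rfl : ((c.toNat:Int) * mp) % m ≡ (c.toNat:Int) * mp [ZMOD m]).trans
      (hmp'.mul_left _)
  have hp : pvP b (c :: u) = (c.toNat:Int) * b ^ K' + pvP b u := by
    unfold pvP
    simp only [List.foldl_cons]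
    rw [pvP_shift b u ((0:Int) * b + (c.toNat:Int)), hu]
    ring_nf
  have h1 : (pvH b m (c :: u) - ((c.toNat:Int) * mp) % m) % m ≡ pvP b u [ZMOD m] := by
    refine (Int.emod_emod_of_dvd _ dvd_rfl :
      (pvH b m (c :: u) - ((c.toNat:Int) * mp) % m) % m ≡ pvH b m (c :: u) - ((c.toNat:Int) * mp) % m [ZMOD m]).trans ?_
    have h := hrh.sub hsub
    rw [hp] at h
    have e : ((c.toNat:Int)) * b ^ K' + pvP b u - (c.toNat:Int) * b ^ K' = pvP b u := by ring
    rw [e] at h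
    exact h
  have h2 : ((pvH b m (c :: u) - ((c.toNat:Int) * mp) % m) % m * b) % m ≡ pvP b u * b [ZMOD m] :=
    (Int.emod_emod_of_dvd _ dvd_rfl :
      ((pvH b m (c :: u) - ((c.toNat:Int) * mp) % m) % m * b) % m ≡ _ [ZMOD m]).trans (h1.mul_right b)
  have h3 : ((pvH b m (c :: u) - ((c.toNat:Int) * mp) % m) % m * b) % m + (d.toNat:Int)
      ≡ pvP b u * b + (d.toNat:Int) [ZMOD m] := h2.add_right _
  show _ = pvP b (u ++ [d]) % m
  rw [show pvP b (u ++ [d]) = pvP b u * b + (d.toNat:Int) from pvP_append b u d]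
  exact h3

lemma pv_win_cons (cs : List Char) (K' j : Nat) (hKj : K' + 1 ≤ j) (hj : j < cs.length) :
    pvWin cs (K' + 1) j = cs[j - (K' + 1)]'(by omega) :: (cs.drop (j - (K' + 1) + 1)).take K' := by
  unfold pvWin
  rw [List.drop_eq_getElem_cons (show j - (K'+1) < cs.length by omega), List.take_succ_cons]

lemma pv_win_snoc (cs : List Char) (K' j : Nat) (hKj : K' + 1 ≤ j) (hj : j < cs.length) :
    pvWin cs (K' + 1) (j + 1) = (cs.drop (j - (K' + 1) + 1)).take K' ++ [cs[j]] := by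
  unfold pvWin
  rw [show j + 1 - (K' + 1) = j - K' by omega, show j - (K' + 1) + 1 = j - K' by omega,
      List.take_add_one]
  congr 1
  rw [List.getElem?_drop, List.getElem?_eq_getElem (show j - K' + K' < cs.length by omega)]
  simp only [Option.toList_some]
  congr 2
  omega

lemma pv_distinct_pos (cs : List Char) (h : cs ≠ []) : 1 ≤ pvNumDistinct cs := by
  obtain ⟨c, t, rfl⟩ := List.exists_cons_of_ne_nil h
  unfold pvNumDistinct
  rw [PySem.Set.ofList_cons]
  simp

lemma pv_rv_init (cs : List Char) (K' : Nat) (m : Int) (h : K' + 1 ≤ cs.length) :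
    (List.replicate cs.length (none : Option Int)).set K'
        (some (pvH (pvNumDistinct cs) m (pvWin cs (K'+1) (K'+1))))
      = pvRvAt cs (K'+1) m (K'+1) := by
  unfold pvRvAt
  rw [show cs.length = K' + (cs.length - K') by omega, List.replicate_add,
      show cs.length - K' = (cs.length - (K'+1)) + 1 by omega, List.replicate_succ]
  rw [pv_set_append' _ _ _ K' (by simp)]
  simp only [show K' + 1 - (K' + 1) + 1 = 1 by omega, List.range'_succ, List.range'_zero,
    List.map_cons, List.map_nil, List.set_cons_zero, List.append_assoc,
    List.cons_append, List.nil_append]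
  rw [show K' + 1 - 1 = K' by omega,
      show K' + (cs.length - (K' + 1) + 1) - (K' + 1) = cs.length - (K' + 1) by omega]

lemma pv_rvAt_set (cs : List Char) (K' : Nat) (m : Int) (j : Nat)
    (hKj : K' + 1 ≤ j) (hj : j < cs.length) :
    (pvRvAt cs (K'+1) m j).set j (some (pvH (pvNumDistinct cs) m (pvWin cs (K'+1) (j+1))))
      = pvRvAt cs (K'+1) m (j+1) := by
  unfold pvRvAt
  rw [pv_set_append' _ _ _ j (by simp; omega)]
  rw [show cs.length - j = (cs.length - (j+1)) + 1 by omega, List.replicate_succ]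
  conv_rhs => rw [show j + 1 - (K'+1) + 1 = (j - (K'+1) + 1) + 1 by omega, List.range'_concat]
  simp only [List.map_append, List.set_cons_zero, List.append_assoc, List.map_cons, List.map_nil,
    List.cons_append, List.nil_append]
  rw [show K' + 1 + 1 * (j - (K' + 1) + 1) = j + 1 by omega]

lemma pv_roll_loop (cs : List Char) (K' : Nat) (m mp : Int) (hm : 0 < m)
    (hmp : mp % m = (pvNumDistinct cs) ^ K' % m) :
    ∀ (d j : Nat), j = K' + 1 + d → j ≤ cs.length →
    (PySem.List.pyRange ((K'+1 : Nat) : Int) (j : Int)).foldl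
      (fun (st : Int × List (Option Int)) i =>
        (PySem.Int.mod (PySem.Int.mod (PySem.Int.mod (st.1 - PySem.Int.mod (((PySem.List.pyGetD cs (i - ((K'+1:Nat):Int)) ' ').toNat : Int) * mp) m) m * (pvNumDistinct cs)) m + ((PySem.List.pyGetD cs i ' ').toNat : Int)) m,
         PySem.List.pySetD st.2 i (some (PySem.Int.mod (PySem.Int.mod (PySem.Int.mod (st.1 - PySem.Int.mod (((PySem.List.pyGetD cs (i - ((K'+1:Nat):Int)) ' ').toNat : Int) * mp) m) m * (pvNumDistinct cs)) m + ((PySem.List.pyGetD cs i ' ').toNat : Int)) m))))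
      (pvH (pvNumDistinct cs) m (pvWin cs (K'+1) (K'+1)), pvRvAt cs (K'+1) m (K'+1))
    = (pvH (pvNumDistinct cs) m (pvWin cs (K'+1) j), pvRvAt cs (K'+1) m j) := by
  intro d
  induction d with
  | zero =>
      intro j hj _
      subst hj
      rw [show K' + 1 + 0 = K' + 1 by omega]
      rw [pv_pyRange_natCast (K'+1) (K'+1) le_rfl]
      simp
  | succ d ih =>
      intro j hj hjn
      have hj1 : j - 1 = K' + 1 + d := by omega
      have hrange : PySem.List.pyRange ((K'+1:Nat):Int) (j : Int)
          = PySem.List.pyRange ((K'+1:Nat):Int) ((j-1 : Nat) : Int) ++ [((j-1:Nat):Int)] := by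
        rw [show (j:Int) = ((j-1:Nat):Int) + 1 by push_cast [show 1 ≤ j by omega]; ring]
        exact PySem.List.pyRange_one_succ_right (by push_cast; omega)
      rw [hrange, List.foldl_append, ih (j-1) hj1 (by omega)]
      simp only [List.foldl_cons, List.foldl_nil]
      have hgd1 : PySem.List.pyGetD cs (((j-1:Nat):Int) - ((K'+1:Nat):Int)) ' '
          = cs[(j-1) - (K'+1)]'(by omega) := by
        rw [show (((j-1:Nat):Int) - ((K'+1:Nat):Int)) = (((j-1) - (K'+1) : Nat) : Int) by push_cast [show K'+1 ≤ j-1 by omega]; ring]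
        rw [PySem.List.pyGetD_eq_getElem cs ' ' (by positivity) (by omega)]
        simp
      have hgd2 : PySem.List.pyGetD cs ((j-1:Nat):Int) ' ' = cs[j-1]'(by omega) := by
        rw [PySem.List.pyGetD_eq_getElem cs ' ' (by positivity) (by omega)]
        simp
      have hwc := pv_win_cons cs K' (j-1) (by omega) (by omega)
      have hlen : ((cs.drop ((j-1) - (K'+1) + 1)).take K').length = K' := by
        simp
        omega
      have hsn : pvWin cs (K'+1) j = (cs.drop ((j-1) - (K'+1) + 1)).take K' ++ [cs[j-1]'(by omega)] := by
        have h := pv_win_snoc cs K' (j-1) (by omega) (by omega)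
        rwa [show (j-1) + 1 = j by omega] at h
      have hstep :
          PySem.Int.mod (PySem.Int.mod (PySem.Int.mod (pvH (pvNumDistinct cs) m (pvWin cs (K'+1) (j-1)) - PySem.Int.mod (((PySem.List.pyGetD cs (((j-1:Nat):Int) - ((K'+1:Nat):Int)) ' ').toNat : Int) * mp) m) m * (pvNumDistinct cs)) m + ((PySem.List.pyGetD cs ((j-1:Nat):Int) ' ').toNat : Int)) m
            = pvH (pvNumDistinct cs) m (pvWin cs (K'+1) j) := by
        rw [hgd1, hgd2, hwc, hsn]
        exact pv_step (pvNumDistinct cs) m hm K' mp hmp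
          (cs[(j-1) - (K'+1)]'(by omega)) (cs[j-1]'(by omega))
          ((cs.drop ((j-1) - (K'+1) + 1)).take K') hlen
      rw [hstep]
      rw [PySem.List.pySetD_natCast]
      have hset := pv_rvAt_set cs K' m (j-1) (by omega) (by omega)
      rw [show (j-1) + 1 = j by omega] at hset
      rw [hset]

-- A's helper on k = 0: all-None list
lemma pvRollDumb_zero (cs : List Char) (base m : Int)
    (hbase : base ≤ m) (hbb : base * base ≤ m) (hdist : pvNumDistinct cs ≤ base) :
    pvRollDumb cs 0 base m = some (List.replicate cs.length none) := by
  unfold pvRollDumb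
  rw [if_neg (not_not_intro ⟨le_rfl, by positivity⟩), if_neg (not_not_intro hbase),
      if_neg (not_not_intro hbb), if_neg (not_not_intro hdist)]
  simp

lemma pv_first_loop (cs : List Char) (K : Nat) (m : Int) (hm : 0 < m) (hKn : K ≤ cs.length) :
    (PySem.List.pyRange 0 (K : Int)).foldl
      (fun h i => PySem.Int.mod (PySem.Int.mod (h * pvNumDistinct cs) m + ((PySem.List.pyGetD cs i ' ').toNat : Int)) m) 0
      = pvH (pvNumDistinct cs) m (pvWin cs K K) := by
  rw [PySem.List.pyRange_zero_natCast, List.foldl_map]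
  rw [PySem.List.foldl_congr_mem (List.range K) _
    (fun h (i : Nat) => (h * pvNumDistinct cs + ((cs.getD i ' ').toNat : Int)) % m) 0
    (by
      intro acc i hi
      rw [List.mem_range] at hi
      have e1 : PySem.List.pyGetD cs (i : Int) ' ' = cs.getD i ' ' := by
        rw [PySem.List.pyGetD_eq_getElem cs ' ' (by positivity) (by omega)]
        simp [List.getD, List.getElem?_eq_getElem (show i < cs.length by omega)]
      rw [e1]
      exact congrFun (congrFun (pv_twostep (pvNumDistinct cs) m hm) acc) (cs.getD i ' '))]
  rw [List.range_eq_range',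
      pv_foldl_range'_getElem cs (fun h c => (h * pvNumDistinct cs + (c.toNat : Int)) % m) ' ' K 0 (by omega) 0]
  unfold pvWin
  rw [show K - K = 0 by omega]
  rw [show (0:Int) = 0 % m from (Int.zero_emod m).symm, pv_foldmod]
  rfl

lemma pv_slice_fold (cs : List Char) (K : Nat) (m : Int) (hm : 0 < m) (i : Nat)
    (hKi : K ≤ i) (hin : i ≤ cs.length) :
    (PySem.List.slice cs (some ((i : Int) - (K : Int))) (some (i : Int))).foldl
      (fun h c => PySem.Int.mod (h * pvNumDistinct cs + (c.toNat : Int)) m) 0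
      = pvH (pvNumDistinct cs) m (pvWin cs K i) := by
  have hsl : PySem.List.slice cs (some ((i : Int) - (K : Int))) (some (i : Int)) = pvWin cs K i := by
    rw [show (i : Int) - (K : Int) = ((i - K : Nat) : Int) by push_cast [hKi]; ring]
    simp only [PySem.List.slice, Nat.cast_nonneg, PySem.List.clampIdx_of_nonneg, Int.toNat_natCast]
    rw [Nat.min_eq_left (show i - K ≤ cs.length by omega), Nat.min_eq_left hin]
    unfold pvWin
    rw [show i - (i - K) = K by omega]
  rw [hsl]
  have hfun : (fun (h : Int) (c : Char) => PySem.Int.mod (h * pvNumDistinct cs + (c.toNat : Int)) m)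
      = fun h c => (h * pvNumDistinct cs + (c.toNat : Int)) % m := by
    funext h c
    rw [PySem.Int.mod_eq_emod_of_pos hm]
  rw [hfun, show (0:Int) = 0 % m from (Int.zero_emod m).symm, pv_foldmod]
  rfl

-- A's helper on k ≥ 1: the rolling values are exactly the window hashes
lemma pvRollDumb_pos (cs : List Char) (k base m : Int) (hk1 : 1 ≤ k) (hk : k ≤ (cs.length : Int))
    (hbase : base ≤ m) (hbb : base * base ≤ m) (hdist : pvNumDistinct cs ≤ base) :
    pvRollDumb cs k base m
      = some (List.replicate (k.toNat - 1) none ++ (pvHashes cs k.toNat m).map some) := by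
  obtain ⟨K', hK'⟩ : ∃ K', k.toNat = K' + 1 := ⟨k.toNat - 1, by omega⟩
  have hkK : k = ((K' + 1 : Nat) : Int) := by omega
  subst hkK
  have hn : K' + 1 ≤ cs.length := by exact_mod_cast hk
  have hb1 : 1 ≤ pvNumDistinct cs := pv_distinct_pos cs (by intro h; subst h; simp at hn)
  have hm : 0 < m := by omega
  unfold pvRollDumb
  rw [if_neg (not_not_intro ⟨by positivity, hk⟩), if_neg (not_not_intro hbase),
      if_neg (not_not_intro hbb), if_neg (not_not_intro hdist)]
  simp only []
  rw [if_neg (show ¬((K' + 1 : Nat) : Int) = 0 by push_cast; omega)]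
  rw [pv_first_loop cs (K'+1) m hm hn]
  rw [show ((K'+1:Nat):Int) - 1 = ((K' : Nat) : Int) by push_cast; ring]
  rw [PySem.List.pySetD_natCast, pv_rv_init cs K' m hn]
  have hmp : (List.foldl (fun p _ => PySem.Int.mod (p * pvNumDistinct cs) m) 1
      (PySem.List.pyRange 1 ((K'+1:Nat):Int))) % m = (pvNumDistinct cs) ^ K' % m := by
    have h := pv_maxPower (pvNumDistinct cs) m hm (K'+1) (by omega)
    rwa [show K' + 1 - 1 = K' by omega] at h
  rw [pv_roll_loop cs K' m _ hm hmp (cs.length - (K'+1)) cs.length (by omega) le_rfl]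
  have hsplit : pvRvAt cs (K'+1) m cs.length
      = (List.replicate (K'+1-1) (none : Option Int)
          ++ (List.range' (K'+1) (cs.length-(K'+1))).map (fun i => (some (pvH (pvNumDistinct cs) m (pvWin cs (K'+1) i)) : Option Int)))
        ++ [some (pvH (pvNumDistinct cs) m (pvWin cs (K'+1) cs.length))] := by
    unfold pvRvAt
    rw [List.range'_concat]
    simp only [List.map_append, List.map_cons, List.map_nil, List.append_assoc, Nat.sub_self,
      List.replicate_zero, List.append_nil]
    rw [show K' + 1 + 1 * (cs.length - (K' + 1)) = cs.length by omega]
  have hlast : PySem.List.pyGetD (pvRvAt cs (K'+1) m cs.length) (-1) none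
      = some (pvH (pvNumDistinct cs) m (pvWin cs (K'+1) cs.length)) := by
    rw [hsplit]
    simp only [PySem.List.pyGetD, PySem.List.pyGet?_neg_one_append_singleton]
    rfl
  rw [if_neg (by rw [hlast]; simp)]
  have hL : (((pvRvAt cs (K'+1) m cs.length).length : Nat) : Int) = (cs.length : Int) := by
    unfold pvRvAt
    simp
    omega
  rw [if_neg (not_not_intro hL)]
  have hCn : (pvRvAt cs (K'+1) m cs.length).count none = K' := by
    unfold pvRvAt
    rw [List.count_append, List.count_append, List.count_replicate, List.count_replicate]
    rw [show ((List.range' (K'+1) (cs.length-(K'+1)+1)).map (fun i => (some (pvH (pvNumDistinct cs) m (pvWin cs (K'+1) i)) : Option Int))).count none = 0 from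
      List.count_eq_zero.mpr (by simp)]
    simp
  have hC : (((pvRvAt cs (K'+1) m cs.length).count none : Nat) : Int) = ((K' : Nat) : Int) := by
    rw [hCn]
  rw [if_neg (not_not_intro hC)]
  rw [hK']
  congr 1
  unfold pvRvAt pvHashes
  simp [List.map_map]

-- B's helper under the same asserts: the set of the window hashes
lemma pvWindowHashes_pos (cs : List Char) (k base m : Int) (hk1 : 1 ≤ k) (hk : k ≤ (cs.length : Int))
    (hbase : base ≤ m) (hbb : base * base ≤ m) (hdist : pvNumDistinct cs ≤ base) :
    pvWindowHashes cs k base m = some (PySem.Set.ofList (pvHashes cs k.toNat m)) := by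
  obtain ⟨K', hK'⟩ : ∃ K', k.toNat = K' + 1 := ⟨k.toNat - 1, by omega⟩
  have hkK : k = ((K' + 1 : Nat) : Int) := by omega
  subst hkK
  have hn : K' + 1 ≤ cs.length := by exact_mod_cast hk
  have hb1 : 1 ≤ pvNumDistinct cs := pv_distinct_pos cs (by intro h; subst h; simp at hn)
  have hm : 0 < m := by omega
  unfold pvWindowHashes
  rw [if_neg (not_not_intro ⟨by positivity, hk⟩), if_neg (not_not_intro hbase),
      if_neg (not_not_intro hbb)]
  simp only []
  congr 1
  rw [show (cs.length : Int) + 1 = ((cs.length + 1 : Nat) : Int) by push_cast; ring]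
  rw [pv_pyRange_natCast (K'+1) (cs.length + 1) (by omega)]
  rw [List.foldl_map]
  rw [PySem.List.foldl_congr_mem (List.range' (K'+1) (cs.length + 1 - (K'+1))) _
    (fun hs (i : Nat) => PySem.Set.add hs (pvH (pvNumDistinct cs) m (pvWin cs (K'+1) i)))
    PySem.Set.empty
    (by
      intro acc i hi
      rw [List.mem_range'_1] at hi
      simp only []
      rw [pv_slice_fold cs (K'+1) m hm i (by omega) (by omega)])]
  rw [hK']
  unfold pvHashes
  rw [PySem.Set.ofList_eq_foldl, List.foldl_map]
  rw [show cs.length + 1 - (K'+1) = cs.length - (K'+1) + 1 by omega]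
  rfl

lemma pvWindowHashes_some (cs : List Char) (k base m : Int) (hk0 : 0 ≤ k) (hk : k ≤ (cs.length : Int))
    (hbase : base ≤ m) (hbb : base * base ≤ m) :
    ∃ S, pvWindowHashes cs k base m = some S := by
  unfold pvWindowHashes
  rw [if_neg (not_not_intro ⟨hk0, hk⟩), if_neg (not_not_intro hbase), if_neg (not_not_intro hbb)]
  exact ⟨_, rfl⟩

lemma pv_any_replicate_none (n : Nat) (f : Option Int → Bool) (hf : f none = false) :
    (List.replicate n (none : Option Int)).any f = false := by
  rw [List.any_eq_false]
  intro x hx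
  rw [List.eq_of_mem_replicate hx]
  simp [hf]

-- the final membership bridge
lemma pv_final (hs1 hs2 : List Int) (K' : Nat) :
    (List.replicate K' (none : Option Int) ++ hs2.map some).any (fun z => !(z == none)
        && PySem.Set.contains (if PySem.Set.contains (PySem.Set.ofList (List.replicate K' (none : Option Int) ++ hs1.map some)) none
             then PySem.Set.discard (PySem.Set.ofList (List.replicate K' (none : Option Int) ++ hs1.map some)) none
             else PySem.Set.ofList (List.replicate K' (none : Option Int) ++ hs1.map some)) z)
      = !(PySem.Set.isdisjoint (PySem.Set.ofList hs1) (PySem.Set.ofList hs2)) := by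
  have hmem : ∀ z : Option Int, z ≠ none →
      (PySem.Set.contains (if PySem.Set.contains (PySem.Set.ofList (List.replicate K' (none : Option Int) ++ hs1.map some)) none
             then PySem.Set.discard (PySem.Set.ofList (List.replicate K' (none : Option Int) ++ hs1.map some)) none
             else PySem.Set.ofList (List.replicate K' (none : Option Int) ++ hs1.map some)) z = true
        ↔ z ∈ (List.replicate K' (none : Option Int) ++ hs1.map some)) := by
    intro z hz
    split_ifs with h
    · rw [PySem.Set.contains_iff, PySem.Set.mem_discard, PySem.Set.mem_ofList]
      tauto
    · rw [PySem.Set.contains_iff, PySem.Set.mem_ofList]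
  rw [show (!(PySem.Set.isdisjoint (PySem.Set.ofList hs1) (PySem.Set.ofList hs2)))
      = (PySem.Set.ofList hs1).any (fun x => PySem.Set.contains (PySem.Set.ofList hs2) x) from by
    unfold PySem.Set.isdisjoint; rw [Bool.not_not]]
  rw [Bool.eq_iff_iff]
  simp only [List.any_eq_true, Bool.and_eq_true, Bool.not_eq_true', beq_eq_false_iff_ne, ne_eq]
  constructor
  · rintro ⟨z, hzmem, hzne, hzc⟩
    rw [hmem z hzne] at hzc
    rw [List.mem_append] at hzmem hzc
    obtain ⟨h, hh, rfl⟩ : ∃ h, h ∈ hs2 ∧ z = some h := by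
      rcases hzmem with h1 | h1
      · exact absurd (List.eq_of_mem_replicate h1) hzne
      · obtain ⟨h, hh, rfl⟩ := List.mem_map.mp h1
        exact ⟨h, hh, rfl⟩
    have hh1 : h ∈ hs1 := by
      rcases hzc with h1 | h1
      · exact absurd (List.eq_of_mem_replicate h1) hzne
      · obtain ⟨h', hh', he⟩ := List.mem_map.mp h1
        rw [Option.some.injEq] at he
        rwa [he] at hh'
    refine ⟨h, (PySem.Set.mem_ofList hs1 h).mpr hh1, ?_⟩
    rw [PySem.Set.contains_iff, PySem.Set.mem_ofList]
    exact hh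
  · rintro ⟨h, hmem1, hc⟩
    rw [PySem.Set.mem_ofList] at hmem1
    rw [PySem.Set.contains_iff, PySem.Set.mem_ofList] at hc
    refine ⟨some h, ?_, by simp, ?_⟩
    · rw [List.mem_append, List.mem_map]
      exact Or.inr ⟨h, hc, rfl⟩
    · rw [hmem (some h) (by simp), List.mem_append, List.mem_map]
      exact Or.inr ⟨h, hmem1, rfl⟩

-- ===== VERDICT (by name: the statement is the Claim_ definition above) =====
theorem rolling_hash_string_pair_intersection_spec : Claim_equal_rolling_hash_string_pair_intersection := by
  intro s1 s2 k base m _ hpre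
  obtain ⟨hk0, hL1, hL2, hbase, hbb, hd1, hd2⟩ := hpre
  unfold Spec_rolling_hash_string_pair_intersection
  unfold rolling_hash_string_pair_intersection rolling_hash_string_pair_intersection_alt
  rw [if_neg (not_not_intro hd1), if_neg (not_not_intro hd2),
      if_neg (not_not_intro hd1), if_neg (not_not_intro hd2)]
  obtain ⟨S1, e1⟩ := pvWindowHashes_some s1.toList k base m hk0 hL1 hbase hbb
  obtain ⟨S2, e2⟩ := pvWindowHashes_some s2.toList k base m hk0 hL2 hbase hbb
  by_cases hk : k = 0
  · subst hk
    rw [pvRollDumb_zero s1.toList base m hbase hbb hd1,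
        pvRollDumb_zero s2.toList base m hbase hbb hd2, e1, e2]
    simp only []
    simp only [if_true]
    exact pv_any_replicate_none _ _ (by simp)
  · rw [pvRollDumb_pos s1.toList k base m (by omega) hL1 hbase hbb hd1,
        pvRollDumb_pos s2.toList k base m (by omega) hL2 hbase hbb hd2,
        pvWindowHashes_pos s1.toList k base m (by omega) hL1 hbase hbb hd1,
        pvWindowHashes_pos s2.toList k base m (by omega) hL2 hbase hbb hd2]
    simp only []
    rw [if_neg hk]
    exact pv_final (pvHashes s1.toList k.toNat m) (pvHashes s2.toList k.toNat m) (k.toNat - 1)
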